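-- pv_equiv track=rewrite | github.com/luispl77/aerial-d | datagen/utils/4_debug_filter_unique.py | standardize_expression
-- ===== SOURCE A (Python) =====
-- def standardize_expression(expr):
--     """Standardize class names inside expressions"""
--     for original, standard in {
--         'Large_Vehicle': 'large vehicle',
--         'Small_Vehicle': 'small vehicle',
--         'storage_tank': 'storage tank',
--         'plane': 'plane',
--         'ship': 'ship',
--         'Swimming_pool': 'swimming pool',
--         'Harbor': 'harbor',
--         'tennis_court': 'tennis court',
--         'Ground_Track_Field': 'ground track field',
--         'Soccer_ball_field': 'soccer ball field',
--         'baseball_diamond': 'baseball diamond',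
--         'Bridge': 'bridge',
--         'basketball_court': 'basketball court',
--         'Roundabout': 'roundabout',
--         'Helicopter': 'helicopter'
--     }.items():
--         expr = expr.replace(original, standard)
--     return expr.lower()
-- ===== SOURCE B (Python) =====
-- CLASS_KEYS = [
--     'Large_Vehicle', 'Small_Vehicle', 'storage_tank', 'plane', 'ship',
--     'Swimming_pool', 'Harbor', 'tennis_court', 'Ground_Track_Field',
--     'Soccer_ball_field', 'baseball_diamond', 'Bridge', 'basketball_court',
--     'Roundabout', 'Helicopter',
-- ]
--
--
-- def _subst(s, key, repl):
--     """Replace every occurrence of key in s by repl, by recursive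
--     find-and-splice (leftmost occurrence first, continue after it)."""
--     i = s.find(key)
--     if i < 0:
--         return s
--     return s[:i] + repl + _subst(s[i + len(key):], key, repl)
--
--
-- def standardize_expression(expr):
--     """Standardize class names inside expressions"""
--     for key in CLASS_KEYS:
--         expr = _subst(expr, key, key.lower().replace('_', ' '))
--     return expr.lower()
-- ===== Notes on version B (the rewrite author's own statement) =====
-- stated objective: alternative
-- what changed: B keeps only the 15 class-name keys, derives each standard form from the key itself (lowercase it and turn underscores into spaces), and performs each substitution by a recursive find-and-splice (prefix + replacement + recurse on the tail after the match) instead of A's dict of hard-coded pairs with str.replace; sequential rule application is kept on purpose because a single-pass alternation rewrite is not exact on overlapping key occurrences.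
import Mathlib
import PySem

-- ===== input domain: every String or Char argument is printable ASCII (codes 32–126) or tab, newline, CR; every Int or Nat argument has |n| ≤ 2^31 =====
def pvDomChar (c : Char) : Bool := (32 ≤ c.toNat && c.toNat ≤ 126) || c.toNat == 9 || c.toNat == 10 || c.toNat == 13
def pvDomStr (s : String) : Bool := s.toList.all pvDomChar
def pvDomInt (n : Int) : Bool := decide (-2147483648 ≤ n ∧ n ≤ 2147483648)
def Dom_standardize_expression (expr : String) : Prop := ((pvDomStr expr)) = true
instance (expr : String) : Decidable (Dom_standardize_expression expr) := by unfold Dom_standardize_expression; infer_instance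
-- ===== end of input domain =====

-- B keeps only the 15 class-name keys, derives each standard form as key.lower().replace('_',' ')
-- and substitutes by recursive find-and-splice, instead of A's hard-coded pair dict with
-- str.replace (objective: alternative, same exact results).

-- ===== PORT A =====
def pvMappingA : List (String × String) :=
  [("Large_Vehicle", "large vehicle"),
   ("Small_Vehicle", "small vehicle"),
   ("storage_tank", "storage tank"),
   ("plane", "plane"),
   ("ship", "ship"),
   ("Swimming_pool", "swimming pool"),
   ("Harbor", "harbor"),
   ("tennis_court", "tennis court"),
   ("Ground_Track_Field", "ground track field"),
   ("Soccer_ball_field", "soccer ball field"),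
   ("baseball_diamond", "baseball diamond"),
   ("Bridge", "bridge"),
   ("basketball_court", "basketball court"),
   ("Roundabout", "roundabout"),
   ("Helicopter", "helicopter")]

def standardize_expression (expr : String) : String :=
  PySem.Str.lower (pvMappingA.foldl (fun s kv => PySem.Str.replace s kv.1 kv.2) expr)

-- ===== PORT B =====
def pvClassKeys : List String :=
  ["Large_Vehicle", "Small_Vehicle", "storage_tank", "plane", "ship",
   "Swimming_pool", "Harbor", "tennis_court", "Ground_Track_Field",
   "Soccer_ball_field", "baseball_diamond", "Bridge", "basketball_court",
   "Roundabout", "Helicopter"]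

-- _subst from Source B: find the leftmost occurrence, splice repl in, recurse on the tail.
-- fuel = length of the string is a totality guard only (each occurrence consumes ≥ 1 char).
def pvSubstGo (key repl : List Char) : Nat → List Char → List Char
  | 0, s => s
  | fuel + 1, s =>
      let i := PySem.Chars.find s key
      if i < 0 then s
      else
        PySem.List.slice s none (some i) ++ repl ++
          pvSubstGo key repl fuel (PySem.List.slice s (some (i + (key.length : Int))) none)

def pvSubst (s key repl : List Char) : List Char := pvSubstGo key repl s.length s

def standardize_expression_alt (expr : String) : String :=
  PySem.Str.lower (String.ofList (pvClassKeys.foldl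
    (fun s key =>
      pvSubst s key.toList (PySem.Chars.replace (PySem.Chars.lower key.toList) ['_'] [' ']))
    expr.toList))

-- ===== PRECONDITION & SPEC =====
def Spec_standardize_expression (expr : String) (out : String) : Prop := out = standardize_expression_alt expr
instance (expr : String) (out : String) : Decidable (Spec_standardize_expression expr out) := by unfold Spec_standardize_expression; infer_instance

-- ===== CLAIM (what is proved, stated in full; the proofs are below) =====
def Claim_equal_standardize_expression : Prop := ∀ (expr : String), Dom_standardize_expression expr → Spec_standardize_expression expr (standardize_expression expr)

-- ===== LEMMAS AND PROOFS =====

-- fuel-indexed, accumulator-free form of PySem.Chars.replace.go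
def pvRepAux (old new : List Char) : Nat → List Char → List Char
  | 0, l => l
  | _ + 1, [] => []
  | fuel + 1, c :: t =>
      if old.isPrefixOf (c :: t) then new ++ pvRepAux old new fuel (List.drop old.length (c :: t))
      else c :: pvRepAux old new fuel t

theorem pvRepAux_go (old new : List Char) :
    ∀ (fuel : Nat) (l acc : List Char),
      PySem.Chars.replace.go old new fuel l acc = acc.reverse ++ pvRepAux old new fuel l := by
  intro fuel
  induction fuel with
  | zero => intro l acc; simp [PySem.Chars.replace.go, pvRepAux]
  | succ fuel ih =>
      intro l acc
      cases l with
      | nil => simp [PySem.Chars.replace.go, pvRepAux]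
      | cons c t =>
          simp only [PySem.Chars.replace.go, pvRepAux]
          split_ifs with h
          · rw [ih]; simp
          · rw [ih]; simp

theorem pvRepAux_fuel_irrel (old new : List Char) (hold : old ≠ []) :
    ∀ (fuel fuel' : Nat) (l : List Char),
      l.length ≤ fuel → l.length ≤ fuel' → pvRepAux old new fuel l = pvRepAux old new fuel' l := by
  intro fuel
  induction fuel with
  | zero =>
      intro fuel' l h _
      have : l = [] := List.eq_nil_of_length_eq_zero (Nat.le_zero.mp h)
      subst this
      cases fuel' <;> simp [pvRepAux]
  | succ fuel ih =>
      intro fuel' l h h'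
      cases l with
      | nil => cases fuel' <;> simp [pvRepAux]
      | cons c t =>
          cases fuel' with
          | zero => simp at h'
          | succ f' =>
              have holdlen : 0 < old.length := List.length_pos_iff.mpr hold
              simp only [pvRepAux]
              split_ifs with hp
              · have hlen : (List.drop old.length (c :: t)).length ≤ fuel ∧
                    (List.drop old.length (c :: t)).length ≤ f' := by
                  rw [List.length_drop]
                  simp only [List.length_cons] at h h' ⊢
                  omega
                rw [ih f' _ hlen.1 hlen.2]
              · have ht : t.length ≤ fuel := by
                  simp only [List.length_cons] at h; omega
                have ht' : t.length ≤ f' := by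
                  simp only [List.length_cons] at h'; omega
                rw [ih f' t ht ht']

theorem pvReplace_eq (s old new : List Char) (h : old ≠ []) :
    PySem.Chars.replace s old new = pvRepAux old new s.length s := by
  rw [PySem.Chars.replace]
  rw [if_neg (by simpa [List.isEmpty_iff] using h)]
  rw [pvRepAux_go]
  simp

-- the three defining equations of Chars.replace (for a nonempty pattern)
theorem pvRep_nil (old new : List Char) (h : old ≠ []) : PySem.Chars.replace [] old new = [] := by
  rw [pvReplace_eq _ _ _ h]; rfl

theorem pvRep_pos (old new : List Char) (h : old ≠ []) (c : Char) (t : List Char)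
    (hp : old.isPrefixOf (c :: t)) :
    PySem.Chars.replace (c :: t) old new
      = new ++ PySem.Chars.replace (List.drop old.length (c :: t)) old new := by
  have holdlen : 0 < old.length := List.length_pos_iff.mpr h
  rw [pvReplace_eq _ _ _ h, pvReplace_eq _ _ _ h]
  simp only [List.length_cons, pvRepAux, hp, if_true]
  congr 1
  apply pvRepAux_fuel_irrel old new h
  · rw [List.length_drop]; simp only [List.length_cons]; omega
  · exact Nat.le_refl _

theorem pvRep_neg (old new : List Char) (h : old ≠ []) (c : Char) (t : List Char)
    (hp : ¬ old.isPrefixOf (c :: t)) :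
    PySem.Chars.replace (c :: t) old new = c :: PySem.Chars.replace t old new := by
  rw [pvReplace_eq _ _ _ h, pvReplace_eq _ _ _ h]
  simp [pvRepAux, hp]

-- no occurrence anywhere → replace is the identity
theorem pvRep_of_not_infix (old new : List Char) (h : old ≠ []) :
    ∀ s : List Char, ¬ old <:+: s → PySem.Chars.replace s old new = s := by
  intro s
  induction s with
  | nil => intro _; exact pvRep_nil old new h
  | cons c t ih =>
      intro hno
      have hp : ¬ old.isPrefixOf (c :: t) := by
        intro hpre
        exact hno (List.IsPrefix.isInfix (List.isPrefixOf_iff_prefix.mp hpre))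
      rw [pvRep_neg old new h c t hp, ih]
      intro hinf
      exact hno (hinf.trans (List.suffix_cons c t).isInfix)

-- first occurrence at index n → replace splits there
theorem pvRep_split (old new : List Char) (h : old ≠ []) :
    ∀ (n : Nat) (s : List Char), (∀ j, j < n → ¬ old <+: s.drop j) → old <+: s.drop n →
      PySem.Chars.replace s old new
        = s.take n ++ new ++ PySem.Chars.replace (s.drop (n + old.length)) old new := by
  intro n
  induction n with
  | zero =>
      intro s _ hpre
      cases s with
      | nil =>
          exfalso
          simp only [List.drop_nil] at hpre
          exact h (List.prefix_nil.mp hpre)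
      | cons c t =>
          simp only [List.drop] at hpre
          rw [pvRep_pos old new h c t (List.isPrefixOf_iff_prefix.mpr hpre)]
          simp
  | succ n ih =>
      intro s hmin hpre
      cases s with
      | nil =>
          exfalso
          simp only [List.drop_nil] at hpre
          exact h (List.prefix_nil.mp hpre)
      | cons c t =>
          have hp0 : ¬ old.isPrefixOf (c :: t) := by
            intro hpre0
            exact hmin 0 (Nat.succ_pos n) (by simpa using List.isPrefixOf_iff_prefix.mp hpre0)
          rw [pvRep_neg old new h c t hp0]
          have ht : PySem.Chars.replace t old new
              = t.take n ++ new ++ PySem.Chars.replace (t.drop (n + old.length)) old new := by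
            apply ih
            · intro j hj
              have := hmin (j + 1) (by omega)
              simpa using this
            · simpa using hpre
          rw [ht]
          simp [List.drop_succ_cons, Nat.succ_add]

-- B's find-and-splice equals Chars.replace (for a nonempty pattern)
theorem pvSubstGo_eq (key repl : List Char) (h : key ≠ []) :
    ∀ (fuel : Nat) (s : List Char), s.length ≤ fuel →
      pvSubstGo key repl fuel s = PySem.Chars.replace s key repl := by
  intro fuel
  induction fuel with
  | zero =>
      intro s hl
      have : s = [] := List.eq_nil_of_length_eq_zero (Nat.le_zero.mp hl)
      subst this
      simp only [pvSubstGo]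
      exact (pvRep_nil key repl h).symm
  | succ fuel ih =>
      intro s hl
      simp only [pvSubstGo]
      by_cases hneg : PySem.Chars.find s key < 0
      · rw [if_pos hneg]
        have heq : PySem.Chars.find s key = -1 := by
          have := PySem.Chars.neg_one_le_find s key
          omega
        exact (pvRep_of_not_infix key repl h s
          ((PySem.Chars.find_eq_neg_one_iff s key).mp heq)).symm
      · rw [if_neg hneg]
        have hfind : PySem.Chars.find s key ≠ -1 := by omega
        have hspec := PySem.Chars.findFrom_natCast_spec s key 0 (Nat.zero_le _)
          (by simp only [Nat.cast_zero, PySem.Chars.findFrom_zero]; exact hfind)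
        simp only [Nat.cast_zero, PySem.Chars.findFrom_zero] at hspec
        obtain ⟨-, hpre, hmin⟩ := hspec
        set i := PySem.Chars.find s key with hi
        have hi0 : 0 ≤ i := by omega
        have hkl : 0 < key.length := List.length_pos_iff.mpr h
        -- the index is within the string
        have hnlen : i.toNat < s.length := by
          have := hpre.length_le
          rw [List.length_drop] at this
          omega
        rw [PySem.List.slice_to (hb := hi0), PySem.List.slice_from (ha := by omega)]
        have htn : (i + (key.length : Int)).toNat = i.toNat + key.length := by omega
        rw [htn]
        have hrec : (s.drop (i.toNat + key.length)).length ≤ fuel := by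
          rw [List.length_drop]; omega
        rw [ih _ hrec]
        exact (pvRep_split key repl h i.toNat s
          (fun j hj => hmin j (by omega) (by omega)) hpre).symm

-- B's per-key step equals A's str.replace step, at the String level
theorem pvStep_eq (s k v : String) (hk : k.toList ≠ [])
    (hv : PySem.Chars.replace (PySem.Chars.lower k.toList) ['_'] [' '] = v.toList) :
    pvSubst s.toList k.toList (PySem.Chars.replace (PySem.Chars.lower k.toList) ['_'] [' '])
      = (PySem.Str.replace s k v).toList := by
  rw [hv, pvSubst, pvSubstGo_eq k.toList v.toList hk _ _ (Nat.le_refl _)]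
  simp [PySem.Str.toList_replace]

-- the fold over keys with derived replacements equals the fold over A's pairs
theorem pvFold_gen :
    ∀ (ps : List (String × String)) (s : String),
      (∀ kv ∈ ps, kv.1.toList ≠ [] ∧
        PySem.Chars.replace (PySem.Chars.lower kv.1.toList) ['_'] [' '] = kv.2.toList) →
      (ps.map Prod.fst).foldl
          (fun l key =>
            pvSubst l key.toList (PySem.Chars.replace (PySem.Chars.lower key.toList) ['_'] [' ']))
          s.toList
        = (ps.foldl (fun t kv => PySem.Str.replace t kv.1 kv.2) s).toList := by
  intro ps
  induction ps with
  | nil => intro s _; rfl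
  | cons kv rest ih =>
      intro s hall
      obtain ⟨k, v⟩ := kv
      obtain ⟨hk, hv⟩ := hall (k, v) (List.mem_cons_self)
      simp only [List.map_cons, List.foldl_cons]
      rw [pvStep_eq s k v hk hv]
      exact ih (PySem.Str.replace s k v) (fun kv hkv => hall kv (List.mem_cons_of_mem _ hkv))

-- ===== VERDICT (by name: the statement is the Claim_ definition above) =====
theorem standardize_expression_spec : Claim_equal_standardize_expression := by
  intro expr _
  unfold Spec_standardize_expression standardize_expression standardize_expression_alt
  have hkeys : pvClassKeys = pvMappingA.map Prod.fst := by decide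
  rw [hkeys, pvFold_gen pvMappingA expr (by decide)]
  rw [String.ofList_toList]
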